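-- pv_equiv track=rewrite | github.com/bmcnultyeng/advent-of-code-2022 | src/day25.py | day25
-- ===== SOURCE A (Python) =====
-- import itertools
--
-- def day25(s):
--     it = itertools.accumulate(
--         itertools.zip_longest(
--             *(line[::-1] for line in s.splitlines()), "0" * 20, fillvalue="0"
--         ),
--         lambda state, t: divmod(
--             state[0] + sum("=-012".index(ch) - 2 for ch in t) + 2, 5
--         ),
--         initial=(0, 0),
--     )
--
--     # return "".join("=-012"[mod] for _, mod in it)[:0:-1].lstrip("0")
--     result = "".join("=-012"[mod] for _, mod in it)[:0:-1].lstrip("0")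
--     return result
-- ===== SOURCE B (Python) =====
-- def day25(s):
--     # Parse each SNAFU line to an integer (Horner), sum, then re-encode the total.
--     total = 0
--     for line in s.splitlines():
--         v = 0
--         for ch in line:
--             v = v * 5 + ("=-012".index(ch) - 2)
--         total += v
--     out = ""
--     while total != 0:
--         total, r = divmod(total + 2, 5)
--         out = "=-012"[r] + out
--     return out
-- ===== Notes on version B (the rewrite author's own statement) =====
-- stated objective: simpler
-- what changed: B parses each line into one integer with Horner's rule, adds the per-line integers, and re-encodes the total with a single divmod loop, instead of A's columnwise base-5 digit addition via zip_longest of reversed lines padded to 20 columns with an accumulate carry chain.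
-- intended difference: On inputs whose SNAFU total needs more than max(20, longest line) balanced base-5 digits, A silently drops the final carry and returns a truncated SNAFU string, while B returns the full SNAFU representation of the true sum, which is the intended value; the witness is two lines of twenty 2-digits. — e.g. on day25("22222222222222222222\n22222222222222222222"): A returns "-", B returns "10000000000000000000-"
import Mathlib
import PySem

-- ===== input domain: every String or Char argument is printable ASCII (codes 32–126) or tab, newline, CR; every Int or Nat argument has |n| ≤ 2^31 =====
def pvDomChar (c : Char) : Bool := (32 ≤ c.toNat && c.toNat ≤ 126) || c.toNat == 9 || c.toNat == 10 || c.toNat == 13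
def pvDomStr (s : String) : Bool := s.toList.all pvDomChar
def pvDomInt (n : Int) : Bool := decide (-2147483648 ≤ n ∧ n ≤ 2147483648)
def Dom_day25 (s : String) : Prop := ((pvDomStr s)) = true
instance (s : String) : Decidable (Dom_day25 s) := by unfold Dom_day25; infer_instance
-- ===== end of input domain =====

-- B replaces A's columnwise zip_longest/accumulate digit addition by parse-sum-re-encode (simpler);
-- on totals overflowing max(20, longest line) digits A truncates (dropped carry) and B returns the true sum (see D_day25).


-- ===== PORT A =====
def snafuA : List Char := ['=', '-', '0', '1', '2']

-- "=-012".index(ch) - 2; a ValueError on a char outside "=-012" is excluded by Pre_day25 (getD 0 is unreachable there)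
def dvA (c : Char) : Int := (((PySem.List.index? snafuA c).getD 0 : Nat) : Int) - 2

def day25 (s : String) : String :=
  let lines := PySem.Chars.splitlines s.toList
  -- line[::-1]
  let revs := lines.map (fun l => (PySem.List.slice? l none none (-1)).getD [])
  -- zip_longest(*revs, "0" * 20, fillvalue="0"): the i-th tuple holds the i-th entry of each
  -- sequence ('0' past the end), for i below the longest length
  let seqs := revs ++ [List.replicate 20 '0']
  let n := seqs.foldr (fun l m => max l.length m) 0
  let cols := (List.range n).map (fun i => seqs.map (fun l => l.getD i '0'))
  -- itertools.accumulate(cols, fun state t => divmod (state.1 + sum(...) + 2) 5, initial := (0, 0))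
  let states := cols.scanl
    (fun st col =>
      let x := st.1 + (col.map dvA).sum + 2
      (PySem.Int.floordiv x 5, PySem.Int.mod x 5)) ((0, 0) : Int × Int)
  -- "=-012"[mod]: mod = x % 5 is always in [0, 5), so getD's default is unreachable
  let joined := states.map (fun st => snafuA.getD st.2.toNat ' ')
  -- [:0:-1]: every element after index 0, in reverse order (exact for this list of length ≥ 1)
  -- .lstrip("0"): drop leading '0' characters (exact)
  String.ofList (((joined.drop 1).reverse).dropWhile (· == '0'))

-- ===== PORT B =====
def snafuB : List Char := ['=', '-', '0', '1', '2']

def dvB (c : Char) : Int := (((PySem.List.index? snafuB c).getD 0 : Nat) : Int) - 2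

-- the while loop 'total, r = divmod(total + 2, 5); out = "=-012"[r] + out', one unfolding per
-- iteration; the fuel only makes the loop total (|t| strictly shrinks, so t.natAbs + 1 suffices)
def encodeBGo : Nat → Int → List Char
  | 0, _ => []
  | fuel + 1, t =>
      if t = 0 then []
      else encodeBGo fuel (PySem.Int.floordiv (t + 2) 5) ++
        [snafuB.getD (PySem.Int.mod (t + 2) 5).toNat ' ']

def encodeB (t : Int) : List Char := encodeBGo (t.natAbs + 1) t

def day25_alt (s : String) : String :=
  let lines := PySem.Chars.splitlines s.toList
  let total := lines.foldl (fun acc l => acc + l.foldl (fun v c => v * 5 + dvB c) 0) 0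
  String.ofList (encodeB total)

-- ===== PRECONDITION & SPEC =====
-- Pre_ excludes exactly the inputs with a character outside the five SNAFU digit characters, on which A
-- (and B) raise ValueError from "=-012".index(ch).
def Pre_day25 (s : String) : Prop :=
  ((PySem.Chars.splitlines s.toList).all
    (fun l => l.all (fun c => (['=', '-', '0', '1', '2'] : List Char).contains c))) = true
instance (s : String) : Decidable (Pre_day25 s) := by unfold Pre_day25; infer_instance
def pvWitness_day25 : String := "1=\n12"

-- On inputs whose SNAFU total needs more than max(20, longest line) balanced base-5 digits,
-- A silently drops the final carry and returns a truncated SNAFU string, while B returns the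
-- SNAFU representation of the true sum, which is the intended value.
def D_day25 (s : String) : Prop :=
  (5 : Int) ^ (((PySem.Chars.splitlines s.toList).map List.length).foldr max 20) - 1 <
    2 * (((PySem.Chars.splitlines s.toList).map (fun (l : List Char) =>
      l.foldl (fun v c => 5 * v + ("=-012".toList.idxOf c : Int) - 2) 0)).sum).natAbs
instance (s : String) : Decidable (D_day25 s) := by unfold D_day25; infer_instance

def Spec_day25 (s : String) (out : String) : Prop := ¬ D_day25 s → out = day25_alt s
instance (s : String) (out : String) : Decidable (Spec_day25 s out) := by unfold Spec_day25; infer_instance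

def pvDiffWitness_day25 : String := "22222222222222222222\n22222222222222222222"
def pvDiffWitnessOut_day25 : String × String := ("-", "10000000000000000000-")

-- ===== CLAIM (what is proved, stated in full; the proofs are below) =====
def Claim_unchanged_day25 : Prop := ∀ (s : String), Dom_day25 s → Pre_day25 s → Spec_day25 s (day25 s)
def Claim_changed_day25 : Prop := Dom_day25 (pvDiffWitness_day25) ∧ Pre_day25 (pvDiffWitness_day25) ∧ D_day25 (pvDiffWitness_day25) ∧ day25 (pvDiffWitness_day25) = pvDiffWitnessOut_day25.1 ∧ day25_alt (pvDiffWitness_day25) = pvDiffWitnessOut_day25.2 ∧ pvDiffWitnessOut_day25.1 ≠ pvDiffWitnessOut_day25.2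
def Claim_exact_day25 : Prop := ∀ (s : String), Dom_day25 s → Pre_day25 s → D_day25 s → day25 s ≠ day25_alt s

-- ===== LEMMAS AND PROOFS =====

theorem encodeB_dec (t : Int) (h : t ≠ 0) :
    (PySem.Int.floordiv (t + 2) 5).natAbs < t.natAbs := by
  have h1 := PySem.Int.floordiv_mul_add_mod (t + 2) 5
  have h2 := PySem.Int.mod_nonneg (t + 2) (b := 5) (by norm_num)
  have h3 := PySem.Int.mod_lt (t + 2) (b := 5) (by norm_num)
  omega


-- digit value of a little-endian Int digit list, offset by 2 (SNAFU)
def msVal : List Int → Int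
  | [] => 0
  | m :: ms => (m - 2) + 5 * msVal ms

-- value of a little-endian list of column sums
def dsVal : List Int → Int
  | [] => 0
  | d :: ds => d + 5 * dsVal ds

-- value of a little-endian (reversed) SNAFU digit-char list
def rvalA : List Char → Int
  | [] => 0
  | c :: r => dvA c + 5 * rvalA r

-- the carry chain of A's accumulate: digits (mods) and the final carry
def addRun (c : Int) : List Int → List Int × Int
  | [] => ([], c)
  | d :: ds =>
      let x := c + d + 2
      let p := addRun (PySem.Int.floordiv x 5) ds
      (PySem.Int.mod x 5 :: p.1, p.2)

def chD (m : Int) : Char := snafuA.getD m.toNat ' '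

theorem divmod5 (t' d : Int) (h0 : 0 ≤ d) (h4 : d < 5) :
    PySem.Int.floordiv (5 * t' + d) 5 = t' ∧ PySem.Int.mod (5 * t' + d) 5 = d := by
  have h1 := PySem.Int.floordiv_mul_add_mod (5 * t' + d) 5
  have h2 := PySem.Int.mod_nonneg (5 * t' + d) (b := 5) (by norm_num)
  have h3 := PySem.Int.mod_lt (5 * t' + d) (b := 5) (by norm_num)
  constructor <;> omega

theorem addRun_spec (ds : List Int) (c : Int) :
    msVal (addRun c ds).1 + (addRun c ds).2 * 5 ^ ds.length = c + dsVal ds := by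
  induction ds generalizing c with
  | nil => simp [addRun, msVal, dsVal]
  | cons d ds ih =>
      have h1 := PySem.Int.floordiv_mul_add_mod (c + d + 2) 5
      simp only [addRun, msVal, dsVal, List.length_cons]
      have := ih (PySem.Int.floordiv (c + d + 2) 5)
      rw [pow_succ]
      nlinarith [this, h1]

theorem addRun_digits (ds : List Int) (c : Int) :
    ∀ m ∈ (addRun c ds).1, 0 ≤ m ∧ m < 5 := by
  induction ds generalizing c with
  | nil => simp [addRun]
  | cons d ds ih =>
      intro m hm
      simp only [addRun, List.mem_cons] at hm
      rcases hm with h | h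
      · subst h
        exact ⟨PySem.Int.mod_nonneg _ (by norm_num), PySem.Int.mod_lt _ (by norm_num)⟩
      · exact ih _ m h

theorem addRun_len (ds : List Int) (c : Int) : (addRun c ds).1.length = ds.length := by
  induction ds generalizing c with
  | nil => rfl
  | cons d ds ih => simp [addRun, ih]

theorem msVal_bound (ms : List Int) (h : ∀ m ∈ ms, 0 ≤ m ∧ m < 5) :
    2 * (msVal ms).natAbs ≤ (5 : Int) ^ ms.length - 1 := by
  induction ms with
  | nil => simp [msVal]
  | cons m ms ih =>
      have hm := h m (by simp)
      have ih' := ih (fun x hx => h x (by simp [hx]))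
      simp only [msVal, List.length_cons]
      rw [pow_succ]
      have h5 : (1 : Int) ≤ 5 ^ ms.length := one_le_pow₀ (by norm_num)
      omega

theorem carry_zero (ds : List Int) (hT : 2 * (dsVal ds).natAbs ≤ (5 : Int) ^ ds.length - 1) :
    (addRun 0 ds).2 = 0 ∧ msVal (addRun 0 ds).1 = dsVal ds := by
  have hs := addRun_spec ds 0
  have hd := msVal_bound (addRun 0 ds).1 (addRun_digits ds 0)
  rw [addRun_len] at hd
  have h5 : (1 : Int) ≤ 5 ^ ds.length := one_le_pow₀ (by norm_num)
  set cf := (addRun 0 ds).2 with hcf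
  have hzero : cf = 0 := by
    rcases lt_trichotomy cf 0 with hlt | heq | hgt
    · have : cf * 5 ^ ds.length ≤ (-1) * 5 ^ ds.length :=
        mul_le_mul_of_nonneg_right (by omega) (by positivity)
      omega
    · exact heq
    · have : 1 * 5 ^ ds.length ≤ cf * 5 ^ ds.length :=
        mul_le_mul_of_nonneg_right (by omega) (by positivity)
      omega
  constructor
  · exact hzero
  · rw [hzero] at hs; omega


theorem msVal_append (ms : List Int) (m : Int) :
    msVal (ms ++ [m]) = msVal ms + (m - 2) * 5 ^ ms.length := by
  induction ms with
  | nil => simp [msVal]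
  | cons a ms ih => simp only [List.cons_append, msVal, ih, List.length_cons]; ring

theorem msVal_top_ne (ms : List Int) (m : Int) (hms : ∀ x ∈ ms, 0 ≤ x ∧ x < 5)
    (hne : m ≠ 2) : msVal (ms ++ [m]) ≠ 0 := by
  induction ms with
  | nil => simp [msVal]; omega
  | cons a ms ih =>
      have ha := hms a (by simp)
      have := ih (fun x hx => hms x (by simp [hx]))
      simp only [List.cons_append, msVal]
      omega

theorem encodeBGo_fuel (fuel₁ : Nat) : ∀ (fuel₂ : Nat) (t : Int), t.natAbs < fuel₁ →
    t.natAbs < fuel₂ → encodeBGo fuel₁ t = encodeBGo fuel₂ t := by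
  induction fuel₁ with
  | zero => omega
  | succ fuel₁ ih =>
      intro fuel₂ t h1 h2
      cases fuel₂ with
      | zero => omega
      | succ fuel₂ =>
          by_cases h : t = 0
          · simp [encodeBGo, h]
          · have hd := encodeB_dec t h
            simp only [encodeBGo, if_neg h]
            rw [ih fuel₂ _ (by omega) (by omega)]

theorem encodeB_zero : encodeB 0 = [] := rfl

theorem encodeB_step (t : Int) (h : t ≠ 0) :
    encodeB t = encodeB (PySem.Int.floordiv (t + 2) 5) ++
      [snafuB.getD (PySem.Int.mod (t + 2) 5).toNat ' '] := by
  have hd := encodeB_dec t h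
  show encodeBGo (t.natAbs + 1) t = _
  rw [show encodeBGo (t.natAbs + 1) t = if t = 0 then [] else
      encodeBGo t.natAbs (PySem.Int.floordiv (t + 2) 5) ++
        [snafuB.getD (PySem.Int.mod (t + 2) 5).toNat ' '] from rfl,
    if_neg h, encodeBGo_fuel t.natAbs ((PySem.Int.floordiv (t + 2) 5).natAbs + 1) _
      (by omega) (by omega)]
  rfl

theorem encodeB_full (ms : List Int) (m : Int)
    (hms : ∀ x ∈ ms, 0 ≤ x ∧ x < 5) (hm : 0 ≤ m ∧ m < 5) (hne : m ≠ 2) :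
    encodeB (msVal (ms ++ [m])) = ((ms ++ [m]).map chD).reverse := by
  induction ms with
  | nil =>
      have ht : msVal ([] ++ [m]) = m - 2 := by simp [msVal]
      have h2 : msVal ([] ++ [m]) + 2 = 5 * 0 + m := by omega
      rw [encodeB_step _ (by omega), h2, (divmod5 0 m hm.1 hm.2).1, (divmod5 0 m hm.1 hm.2).2,
        encodeB_zero]
      simp [chD, snafuB, snafuA]
  | cons d ms ih =>
      have hd := hms d (by simp)
      have hrest : ∀ x ∈ ms, 0 ≤ x ∧ x < 5 := fun x hx => hms x (by simp [hx])
      have ht : msVal ((d :: ms) ++ [m]) = (d - 2) + 5 * msVal (ms ++ [m]) := rfl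
      have htail := msVal_top_ne ms m hrest hne
      have h2 : msVal ((d :: ms) ++ [m]) + 2 = 5 * msVal (ms ++ [m]) + d := by omega
      rw [encodeB_step _ (by omega), h2, (divmod5 _ d hd.1 hd.2).1, (divmod5 _ d hd.1 hd.2).2,
        ih hrest]
      simp [chD, snafuB, snafuA]

theorem chD_two_iff (m : Int) (h0 : 0 ≤ m) (h4 : m < 5) : (chD m == '0') = (m == 2) := by
  interval_cases m <;> rfl

theorem encodeB_strip (ms : List Int) (hms : ∀ x ∈ ms, 0 ≤ x ∧ x < 5) :
    ((ms.map chD).reverse).dropWhile (· == '0') = encodeB (msVal ms) := by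
  induction ms using List.reverseRecOn with
  | nil => rw [show msVal [] = 0 from rfl, encodeB_zero]; rfl
  | append_singleton ms m ih =>
      have hm := hms m (by simp)
      have hrest : ∀ x ∈ ms, 0 ≤ x ∧ x < 5 := fun x hx => hms x (by simp [hx])
      have hrev : ((ms ++ [m]).map chD).reverse = chD m :: (ms.map chD).reverse := by simp
      by_cases h2 : m = 2
      · subst h2
        rw [hrev, List.dropWhile_cons_of_pos (by rfl), ih hrest, msVal_append]
        norm_num
      · rw [hrev, List.dropWhile_cons_of_neg (by rw [chD_two_iff m hm.1 hm.2]; simp [h2]),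
          encodeB_full ms m hrest hm h2]
        exact hrev.symm

theorem dsVal_range_succ (f : Nat → Int) (n : Nat) :
    dsVal ((List.range (n + 1)).map f) = f 0 + 5 * dsVal ((List.range n).map (fun i => f (i + 1))) := by
  rw [List.range_succ_eq_map, List.map_cons, List.map_map]
  rfl

theorem dsVal_range_zero (n : Nat) : dsVal ((List.range n).map (fun _ => (0 : Int))) = 0 := by
  induction n with
  | zero => rfl
  | succ n ih => rw [dsVal_range_succ]; simpa using ih

theorem dsVal_range_add (f g : Nat → Int) (n : Nat) :
    dsVal ((List.range n).map (fun i => f i + g i)) =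
      dsVal ((List.range n).map f) + dsVal ((List.range n).map g) := by
  induction n generalizing f g with
  | zero => rfl
  | succ n ih => rw [dsVal_range_succ, dsVal_range_succ f, dsVal_range_succ g, ih]; ring

theorem dvA_zero : dvA '0' = 0 := by decide

theorem dsVal_range_line (r : List Char) (n : Nat) (h : r.length ≤ n) :
    dsVal ((List.range n).map (fun i => dvA (r.getD i '0'))) = rvalA r := by
  induction r generalizing n with
  | nil =>
      have : ((List.range n).map (fun i => dvA (([] : List Char).getD i '0'))) =
          ((List.range n).map (fun _ => (0 : Int))) := by
        apply List.map_congr_left; intro i _; simp [dvA_zero]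
      rw [this, dsVal_range_zero]; rfl
  | cons c r ih =>
      cases n with
      | zero => simp at h
      | succ n =>
          rw [dsVal_range_succ]
          have : ((List.range n).map (fun i => dvA ((c :: r).getD (i + 1) '0'))) =
              ((List.range n).map (fun i => dvA (r.getD i '0'))) := rfl
          rw [this, ih n (by simpa using h)]
          rfl

theorem exchange (seqs : List (List Char)) (n : Nat) (h : ∀ l ∈ seqs, l.length ≤ n) :
    dsVal ((List.range n).map (fun i => ((seqs.map (fun l => l.getD i '0')).map dvA).sum)) =
      (seqs.map rvalA).sum := by
  induction seqs with
  | nil =>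
      have : ((List.range n).map (fun i =>
          ((([] : List (List Char)).map (fun l => l.getD i '0')).map dvA).sum)) =
          ((List.range n).map (fun _ => (0 : Int))) := rfl
      rw [this, dsVal_range_zero]; rfl
  | cons l rest ih =>
      have hstep : ((List.range n).map (fun i =>
          (((l :: rest).map (fun l => l.getD i '0')).map dvA).sum)) =
          ((List.range n).map (fun i =>
            dvA (l.getD i '0') + ((rest.map (fun l => l.getD i '0')).map dvA).sum)) := rfl
      rw [hstep, dsVal_range_add, dsVal_range_line l n (h l (by simp)),
        ih (fun x hx => h x (by simp [hx]))]
      rfl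

theorem rvalA_append (r : List Char) (c : Char) :
    rvalA (r ++ [c]) = rvalA r + dvA c * 5 ^ r.length := by
  induction r with
  | nil => simp [rvalA]
  | cons a r ih => simp only [List.cons_append, rvalA, ih, List.length_cons]; ring

theorem horner (l : List Char) (a : Int) :
    l.foldl (fun v c => v * 5 + dvA c) a = a * 5 ^ l.length + rvalA l.reverse := by
  induction l generalizing a with
  | nil => simp [rvalA]
  | cons c l ih =>
      simp only [List.foldl_cons, ih, List.reverse_cons, rvalA_append, List.length_cons,
        List.length_reverse]
      ring

theorem dvB_eq_dvA : dvB = dvA := rfl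

theorem foldl_sum (lines : List (List Char)) (g : List Char → Int) (a : Int) :
    lines.foldl (fun acc l => acc + g l) a = a + (lines.map g).sum := by
  induction lines generalizing a with
  | nil => simp
  | cons l rest ih => simp [List.foldl_cons, ih]; ring

theorem scanl_snd (cols : List (List Char)) (c m : Int) :
    (List.scanl (fun (st : Int × Int) col =>
        let x := st.1 + (col.map dvA).sum + 2
        (PySem.Int.floordiv x 5, PySem.Int.mod x 5)) (c, m) cols).map Prod.snd =
      m :: (addRun c (cols.map (fun col => (col.map dvA).sum))).1 := by
  induction cols generalizing c m with
  | nil => rfl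
  | cons col cols ih => simp only [List.scanl_cons, List.map_cons, ih, List.map_cons, addRun]

theorem foldr_max_le (ls : List (List Char)) (b : Nat) :
    (∀ l ∈ ls, l.length ≤ ls.foldr (fun l m => max l.length m) b) ∧
      b ≤ ls.foldr (fun l m => max l.length m) b := by
  induction ls with
  | nil => simp
  | cons l rest ih =>
      refine ⟨?_, le_trans ih.2 (le_max_right _ _)⟩
      intro x hx
      rcases List.mem_cons.mp hx with h | h
      · subst h; exact le_max_left _ _
      · exact le_trans (ih.1 x h) (le_max_right _ _)

theorem Pre_iff (s : String) : Pre_day25 s ↔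
    ∀ l ∈ PySem.Chars.splitlines s.toList, ∀ c ∈ l,
      c ∈ (['=', '-', '0', '1', '2'] : List Char) := by
  unfold Pre_day25
  simp [List.all_eq_true]

-- the idxOf digit of D_day25 agrees with dvA on the admitted SNAFU characters
theorem dIf_eq_dvA (c : Char) (h : c ∈ (['=', '-', '0', '1', '2'] : List Char)) :
    ("=-012".toList.idxOf c : Int) - 2 = dvA c := by
  fin_cases h <;> decide

theorem foldl_congr_chars (l : List Char) (f g : Int → Char → Int) (a : Int)
    (h : ∀ c ∈ l, ∀ v, f v c = g v c) : l.foldl f a = l.foldl g a := by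
  induction l generalizing a with
  | nil => rfl
  | cons c l ih =>
      rw [List.foldl_cons, List.foldl_cons, h c (by simp),
        ih _ (fun x hx v => h x (by simp [hx]) v)]

-- the per-line Horner sum in D_day25 equals rvalA on admitted lines
theorem dLine_eq (l : List Char)
    (h : ∀ c ∈ l, c ∈ (['=', '-', '0', '1', '2'] : List Char)) :
    l.foldl (fun v c => 5 * v + ("=-012".toList.idxOf c : Int) - 2) 0 = rvalA l.reverse := by
  rw [foldl_congr_chars l _ (fun v c => v * 5 + dvA c) 0
    (fun c hc v => by rw [show (5 : Int) * v + ("=-012".toList.idxOf c : Int) - 2 =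
      5 * v + (("=-012".toList.idxOf c : Int) - 2) from by ring, dIf_eq_dvA c (h c hc)]; ring),
    horner]
  ring

-- the exponent in D_day25 equals A's zip_longest width n
theorem width_eq (lines : List (List Char)) :
    ((lines.map List.length).foldr max 20) =
      (lines.map List.reverse ++ [List.replicate 20 '0']).foldr
        (fun l m => max l.length m) 0 := by
  induction lines with
  | nil => simp
  | cons l rest ih => simp [ih]

def wl2 : List Char := ['2', '2', '2', '2', '2', '2', '2', '2', '2', '2', '2', '2', '2', '2', '2', '2', '2', '2', '2', '2']

theorem hsplitW : PySem.Chars.splitlines pvDiffWitness_day25.toList = [wl2, wl2] := by decide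

theorem encodeB_wit : encodeB 95367431640624 =
    ['1', '0', '0', '0', '0', '0', '0', '0', '0', '0', '0', '0', '0', '0', '0', '0', '0', '0',
      '0', '0', '-'] := by
  have h0 : encodeB 0 = [] := encodeB_zero
  have h1 : encodeB 1 = ['1'] := by
    rw [encodeB_step 1 (by norm_num), show PySem.Int.floordiv (1 + 2) 5 = 0 from by decide,
      show PySem.Int.mod (1 + 2) 5 = 3 from by decide, h0]
    decide
  have h2 : encodeB 5 = ['1', '0'] := by
    rw [encodeB_step 5 (by norm_num), show PySem.Int.floordiv (5 + 2) 5 = 1 from by decide,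
      show PySem.Int.mod (5 + 2) 5 = 2 from by decide, h1]
    decide
  have h3 : encodeB 25 = ['1', '0', '0'] := by
    rw [encodeB_step 25 (by norm_num), show PySem.Int.floordiv (25 + 2) 5 = 5 from by decide,
      show PySem.Int.mod (25 + 2) 5 = 2 from by decide, h2]
    decide
  have h4 : encodeB 125 = ['1', '0', '0', '0'] := by
    rw [encodeB_step 125 (by norm_num), show PySem.Int.floordiv (125 + 2) 5 = 25 from by decide,
      show PySem.Int.mod (125 + 2) 5 = 2 from by decide, h3]
    decide
  have h5 : encodeB 625 = ['1', '0', '0', '0', '0'] := by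
    rw [encodeB_step 625 (by norm_num), show PySem.Int.floordiv (625 + 2) 5 = 125 from by decide,
      show PySem.Int.mod (625 + 2) 5 = 2 from by decide, h4]
    decide
  have h6 : encodeB 3125 = ['1', '0', '0', '0', '0', '0'] := by
    rw [encodeB_step 3125 (by norm_num), show PySem.Int.floordiv (3125 + 2) 5 = 625 from by decide,
      show PySem.Int.mod (3125 + 2) 5 = 2 from by decide, h5]
    decide
  have h7 : encodeB 15625 = ['1', '0', '0', '0', '0', '0', '0'] := by
    rw [encodeB_step 15625 (by norm_num), show PySem.Int.floordiv (15625 + 2) 5 = 3125 from by decide,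
      show PySem.Int.mod (15625 + 2) 5 = 2 from by decide, h6]
    decide
  have h8 : encodeB 78125 = ['1', '0', '0', '0', '0', '0', '0', '0'] := by
    rw [encodeB_step 78125 (by norm_num), show PySem.Int.floordiv (78125 + 2) 5 = 15625 from by decide,
      show PySem.Int.mod (78125 + 2) 5 = 2 from by decide, h7]
    decide
  have h9 : encodeB 390625 = ['1', '0', '0', '0', '0', '0', '0', '0', '0'] := by
    rw [encodeB_step 390625 (by norm_num), show PySem.Int.floordiv (390625 + 2) 5 = 78125 from by decide,
      show PySem.Int.mod (390625 + 2) 5 = 2 from by decide, h8]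
    decide
  have h10 : encodeB 1953125 = ['1', '0', '0', '0', '0', '0', '0', '0', '0', '0'] := by
    rw [encodeB_step 1953125 (by norm_num), show PySem.Int.floordiv (1953125 + 2) 5 = 390625 from by decide,
      show PySem.Int.mod (1953125 + 2) 5 = 2 from by decide, h9]
    decide
  have h11 : encodeB 9765625 = ['1', '0', '0', '0', '0', '0', '0', '0', '0', '0', '0'] := by
    rw [encodeB_step 9765625 (by norm_num), show PySem.Int.floordiv (9765625 + 2) 5 = 1953125 from by decide,
      show PySem.Int.mod (9765625 + 2) 5 = 2 from by decide, h10]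
    decide
  have h12 : encodeB 48828125 = ['1', '0', '0', '0', '0', '0', '0', '0', '0', '0', '0', '0'] := by
    rw [encodeB_step 48828125 (by norm_num), show PySem.Int.floordiv (48828125 + 2) 5 = 9765625 from by decide,
      show PySem.Int.mod (48828125 + 2) 5 = 2 from by decide, h11]
    decide
  have h13 : encodeB 244140625 = ['1', '0', '0', '0', '0', '0', '0', '0', '0', '0', '0', '0', '0'] := by
    rw [encodeB_step 244140625 (by norm_num), show PySem.Int.floordiv (244140625 + 2) 5 = 48828125 from by decide,
      show PySem.Int.mod (244140625 + 2) 5 = 2 from by decide, h12]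
    decide
  have h14 : encodeB 1220703125 = ['1', '0', '0', '0', '0', '0', '0', '0', '0', '0', '0', '0', '0', '0'] := by
    rw [encodeB_step 1220703125 (by norm_num), show PySem.Int.floordiv (1220703125 + 2) 5 = 244140625 from by decide,
      show PySem.Int.mod (1220703125 + 2) 5 = 2 from by decide, h13]
    decide
  have h15 : encodeB 6103515625 = ['1', '0', '0', '0', '0', '0', '0', '0', '0', '0', '0', '0', '0', '0', '0'] := by
    rw [encodeB_step 6103515625 (by norm_num), show PySem.Int.floordiv (6103515625 + 2) 5 = 1220703125 from by decide,
      show PySem.Int.mod (6103515625 + 2) 5 = 2 from by decide, h14]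
    decide
  have h16 : encodeB 30517578125 = ['1', '0', '0', '0', '0', '0', '0', '0', '0', '0', '0', '0', '0', '0', '0', '0'] := by
    rw [encodeB_step 30517578125 (by norm_num), show PySem.Int.floordiv (30517578125 + 2) 5 = 6103515625 from by decide,
      show PySem.Int.mod (30517578125 + 2) 5 = 2 from by decide, h15]
    decide
  have h17 : encodeB 152587890625 = ['1', '0', '0', '0', '0', '0', '0', '0', '0', '0', '0', '0', '0', '0', '0', '0', '0'] := by
    rw [encodeB_step 152587890625 (by norm_num), show PySem.Int.floordiv (152587890625 + 2) 5 = 30517578125 from by decide,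
      show PySem.Int.mod (152587890625 + 2) 5 = 2 from by decide, h16]
    decide
  have h18 : encodeB 762939453125 = ['1', '0', '0', '0', '0', '0', '0', '0', '0', '0', '0', '0', '0', '0', '0', '0', '0', '0'] := by
    rw [encodeB_step 762939453125 (by norm_num), show PySem.Int.floordiv (762939453125 + 2) 5 = 152587890625 from by decide,
      show PySem.Int.mod (762939453125 + 2) 5 = 2 from by decide, h17]
    decide
  have h19 : encodeB 3814697265625 = ['1', '0', '0', '0', '0', '0', '0', '0', '0', '0', '0', '0', '0', '0', '0', '0', '0', '0', '0'] := by
    rw [encodeB_step 3814697265625 (by norm_num), show PySem.Int.floordiv (3814697265625 + 2) 5 = 762939453125 from by decide,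
      show PySem.Int.mod (3814697265625 + 2) 5 = 2 from by decide, h18]
    decide
  have h20 : encodeB 19073486328125 = ['1', '0', '0', '0', '0', '0', '0', '0', '0', '0', '0', '0', '0', '0', '0', '0', '0', '0', '0', '0'] := by
    rw [encodeB_step 19073486328125 (by norm_num), show PySem.Int.floordiv (19073486328125 + 2) 5 = 3814697265625 from by decide,
      show PySem.Int.mod (19073486328125 + 2) 5 = 2 from by decide, h19]
    decide
  have h21 : encodeB 95367431640624 = ['1', '0', '0', '0', '0', '0', '0', '0', '0', '0', '0', '0', '0', '0', '0', '0', '0', '0', '0', '0', '-'] := by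
    rw [encodeB_step 95367431640624 (by norm_num), show PySem.Int.floordiv (95367431640624 + 2) 5 = 19073486328125 from by decide,
      show PySem.Int.mod (95367431640624 + 2) 5 = 1 from by decide, h20]
    decide
  exact h21

theorem revs_eq (lines : List (List Char)) :
    lines.map (fun l => (PySem.List.slice? l none none (-1)).getD []) = lines.map List.reverse := by
  apply List.map_congr_left
  intro l _
  rw [PySem.List.slice?_none_none_neg_one]
  rfl

theorem Aside (seqs : List (List Char)) (n : Nat) :
    (((((List.range n).map (fun i => seqs.map (fun l => l.getD i '0'))).scanl
        (fun (st : Int × Int) col =>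
          let x := st.1 + (col.map dvA).sum + 2
          (PySem.Int.floordiv x 5, PySem.Int.mod x 5)) ((0, 0) : Int × Int)).map
        (fun st => snafuA.getD st.2.toNat ' ')).drop 1).reverse.dropWhile (· == '0') =
      encodeB (msVal (addRun 0 ((List.range n).map
        (fun i => ((seqs.map (fun l => l.getD i '0')).map dvA).sum))).1) := by
  set cols := (List.range n).map (fun i => seqs.map (fun l => l.getD i '0')) with hcols
  have h1 : (cols.scanl (fun (st : Int × Int) col =>
        let x := st.1 + (col.map dvA).sum + 2
        (PySem.Int.floordiv x 5, PySem.Int.mod x 5)) ((0, 0) : Int × Int)).map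
        (fun st => snafuA.getD st.2.toNat ' ') =
      ((cols.scanl (fun (st : Int × Int) col =>
        let x := st.1 + (col.map dvA).sum + 2
        (PySem.Int.floordiv x 5, PySem.Int.mod x 5)) ((0, 0) : Int × Int)).map Prod.snd).map chD := by
    rw [List.map_map]; rfl
  have h2 : cols.map (fun col => (col.map dvA).sum) =
      (List.range n).map (fun i => ((seqs.map (fun l => l.getD i '0')).map dvA).sum) := by
    rw [hcols, List.map_map]; rfl
  rw [h1, scanl_snd, h2, List.map_cons, List.drop_succ_cons, List.drop_zero]
  exact encodeB_strip _ (addRun_digits _ 0)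

-- D_day25's total term equals the little-endian column total dsVal ds, under Pre_
theorem dtotal_eq (s : String) (hPre : Pre_day25 s) :
    (((PySem.Chars.splitlines s.toList).map (fun (l : List Char) =>
      l.foldl (fun v c => 5 * v + ("=-012".toList.idxOf c : Int) - 2) 0)).sum) =
    dsVal ((List.range (((PySem.Chars.splitlines s.toList).map List.reverse ++
        [List.replicate 20 '0']).foldr (fun l m => max l.length m) 0)).map
      (fun i => ((((PySem.Chars.splitlines s.toList).map List.reverse ++
        [List.replicate 20 '0']).map (fun l => l.getD i '0')).map dvA).sum)) := by
  have hchars := (Pre_iff s).mp hPre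
  set lines := PySem.Chars.splitlines s.toList with hlines
  set seqs := lines.map List.reverse ++ [List.replicate 20 '0'] with hseqs
  rw [exchange seqs _ (foldr_max_le seqs 0).1, hseqs, List.map_append, List.map_map]
  have hg : lines.map (fun l =>
      l.foldl (fun v c => 5 * v + ("=-012".toList.idxOf c : Int) - 2) 0) =
      lines.map (fun l => rvalA l.reverse) := by
    apply List.map_congr_left
    intro l hl
    exact dLine_eq l (hchars l hl)
  rw [hg]
  have h20 : rvalA ['0', '0', '0', '0', '0', '0', '0', '0', '0', '0', '0', '0', '0', '0',
      '0', '0', '0', '0', '0', '0'] = (0 : Int) := by decide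
  simp [Function.comp_def, h20]

theorem main_eq (s : String) (hPre : Pre_day25 s) (hND : ¬ D_day25 s) :
    day25 s = day25_alt s := by
  simp only [day25, day25_alt]
  rw [revs_eq]
  set lines := PySem.Chars.splitlines s.toList with hlines
  set seqs := lines.map List.reverse ++ [List.replicate 20 '0'] with hseqs
  set n := seqs.foldr (fun l m => max l.length m) 0 with hn
  set ds := (List.range n).map (fun i => ((seqs.map (fun l => l.getD i '0')).map dvA).sum)
    with hds
  -- B's total equals the column total
  have hBtot : lines.foldl (fun acc l => acc + l.foldl (fun v c => v * 5 + dvB c) 0) 0 =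
      dsVal ds := by
    rw [dvB_eq_dvA, foldl_sum]
    have hg : lines.map (fun l => l.foldl (fun v c => v * 5 + dvA c) 0) =
        lines.map (fun l => rvalA l.reverse) := by
      apply List.map_congr_left; intro l _; rw [horner]; ring
    rw [hg, hds, exchange seqs n (foldr_max_le seqs 0).1, hseqs, List.map_append,
      List.map_map]
    have h20 : rvalA ['0', '0', '0', '0', '0', '0', '0', '0', '0', '0', '0', '0', '0', '0',
        '0', '0', '0', '0', '0', '0'] = (0 : Int) := by decide
    simp [Function.comp_def, h20]
  -- the carry chain terminates with carry 0 (the total fits in n digits, from ¬D_)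
  have hlen : ds.length = n := by rw [hds]; simp
  have hbound : 2 * (dsVal ds).natAbs ≤ (5 : Int) ^ ds.length - 1 := by
    rw [hlen]
    rw [D_day25, dtotal_eq s hPre] at hND
    simp only [width_eq, ← hlines, ← hseqs, ← hn, ← hds] at hND
    omega
  rw [Aside seqs n, hBtot, (carry_zero ds hbound).2]

theorem encode_len (t : Int) : 2 * t.natAbs ≤ ((5 : Int) ^ (encodeB t).length - 1).natAbs := by
  by_cases h : t = 0
  · subst h; simp [encodeB_zero]
  · rw [encodeB_step t h]
    have := encodeB_dec t h
    have ih := encode_len (PySem.Int.floordiv (t + 2) 5)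
    have h1 := PySem.Int.floordiv_mul_add_mod (t + 2) 5
    have h2 := PySem.Int.mod_nonneg (t + 2) (b := 5) (by norm_num)
    have h3 := PySem.Int.mod_lt (t + 2) (b := 5) (by norm_num)
    rw [List.length_append, List.length_singleton, pow_succ]
    have h5 : (1 : Int) ≤ 5 ^ (encodeB (PySem.Int.floordiv (t + 2) 5)).length :=
      one_le_pow₀ (by norm_num)
    omega
termination_by t.natAbs

-- ===== VERDICT (by name: the statement is the Claim_ definition above) =====
theorem day25_spec : Claim_unchanged_day25 := by
  intro s _ hPre hND
  exact main_eq s hPre hND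
set_option maxRecDepth 10000 in
theorem day25_changed : Claim_changed_day25 := by
  unfold Claim_changed_day25
  refine ⟨by decide, ?_, ?_, ?_, ?_, by decide⟩
  · unfold Pre_day25
    rw [hsplitW]
    decide
  · unfold D_day25
    rw [hsplitW]
    decide
  · show day25 pvDiffWitness_day25 = pvDiffWitnessOut_day25.1
    simp only [day25]
    rw [hsplitW]
    decide
  · show day25_alt pvDiffWitness_day25 = pvDiffWitnessOut_day25.2
    simp only [day25_alt]
    rw [hsplitW, show ([wl2, wl2] : List (List Char)).foldl
        (fun acc l => acc + l.foldl (fun v c => v * 5 + dvB c) 0) 0 = 95367431640624 from by decide,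
      encodeB_wit]
    decide

theorem day25_tight : Claim_exact_day25 := by
  unfold Claim_exact_day25
  intro s _ hPre hD heq
  simp only [day25, day25_alt] at heq
  rw [revs_eq] at heq
  set lines := PySem.Chars.splitlines s.toList with hlines
  set seqs := lines.map List.reverse ++ [List.replicate 20 '0'] with hseqs
  set n := seqs.foldr (fun l m => max l.length m) 0 with hn
  set ds := (List.range n).map (fun i => ((seqs.map (fun l => l.getD i '0')).map dvA).sum)
    with hds
  rw [Aside seqs n] at heq
  have hBtot : lines.foldl (fun acc l => acc + l.foldl (fun v c => v * 5 + dvB c) 0) 0 =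
      dsVal ds := by
    rw [dvB_eq_dvA, foldl_sum]
    have hg : lines.map (fun l => l.foldl (fun v c => v * 5 + dvA c) 0) =
        lines.map (fun l => rvalA l.reverse) := by
      apply List.map_congr_left; intro l _; rw [horner]; ring
    rw [hg, hds, exchange seqs n (foldr_max_le seqs 0).1, hseqs, List.map_append,
      List.map_map]
    have h20 : rvalA ['0', '0', '0', '0', '0', '0', '0', '0', '0', '0', '0', '0', '0', '0',
        '0', '0', '0', '0', '0', '0'] = (0 : Int) := by decide
    simp [Function.comp_def, h20]
  rw [hBtot] at heq
  have hlist := String.ofList_inj.mp heq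
  -- the A side re-encodes at most n digits, so its length is at most n
  have hlenA : (encodeB (msVal (addRun 0 ds).1)).length ≤ n := by
    rw [← encodeB_strip _ (addRun_digits ds 0)]
    calc ((((addRun 0 ds).1.map chD).reverse).dropWhile (· == '0')).length
        ≤ (((addRun 0 ds).1.map chD).reverse).length := List.length_dropWhile_le _ _
      _ = n := by rw [List.length_reverse, List.length_map, addRun_len, hds]; simp
  -- the B side encodes a total too large for n digits, so its length exceeds n
  have hDbound : ((5 : Int) ^ n - 1).natAbs < 2 * (dsVal ds).natAbs := by
    rw [D_day25, dtotal_eq s hPre] at hD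
    simp only [width_eq, ← hlines, ← hseqs, ← hn, ← hds] at hD
    have h5 : (1 : Int) ≤ 5 ^ n := one_le_pow₀ (by norm_num)
    omega
  have hlenB : n < (encodeB (dsVal ds)).length := by
    have h1 := encode_len (dsVal ds)
    have h5n : (1 : Int) ≤ 5 ^ n := one_le_pow₀ (by norm_num)
    have h5m : (1 : Int) ≤ 5 ^ (encodeB (dsVal ds)).length := one_le_pow₀ (by norm_num)
    have hpow : (5 : Int) ^ n < 5 ^ (encodeB (dsVal ds)).length := by omega
    exact (pow_lt_pow_iff_right₀ (by norm_num : (1 : Int) < 5)).mp hpow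
  rw [hlist] at hlenA
  omega
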